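-- pv_equiv track=rewrite | github.com/ToukirAhamedPigeon/PySplitFix | refine.py | fix_row
-- ===== SOURCE A (Python) =====
-- def fix_row(row_line: str, null_column_indexes: list[int]) -> str:
--     row = row_line.strip()
--     if not row.startswith('('):
--         return row_line
--
--     ends_with_comma = row.endswith(',')
--     if ends_with_comma:
--         row = row[:-1]
--
--     parts = []
--     current = ''
--     in_quotes = False
--     quote_char = ''
--
--     for char in row[1:-1]:
--         if char in ['"', "'"]:
--             if not in_quotes:
--                 in_quotes = True
--                 quote_char = char
--             elif in_quotes and char == quote_char:
--                 in_quotes = False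
--         if char == ',' and not in_quotes:
--             parts.append(current.strip())
--             current = ''
--         else:
--             current += char
--     parts.append(current.strip())
--
--     for i in null_column_indexes:
--         if i < len(parts) and parts[i] in ["''", '""']:
--             parts[i] = 'NULL'
--
--     if ends_with_comma:
--         fixed_row = '(' + ', '.join(parts) + '),'
--     else:
--         fixed_row = '(' + ', '.join(parts) + ';'
--
--     return fixed_row + '\n'
-- ===== SOURCE B (Python) =====
-- def _find_comma(s: str):
--     """Index of the first comma of s that is outside quotes, or None."""
--     in_quotes = False
--     quote_char = ''
--     for k, ch in enumerate(s):
--         if ch in ('"', "'"):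
--             if not in_quotes:
--                 in_quotes = True
--                 quote_char = ch
--             elif ch == quote_char:
--                 in_quotes = False
--         if ch == ',' and not in_quotes:
--             return k
--     return None
--
--
-- def _split_top(s: str) -> list[str]:
--     """Split s at its top-level (unquoted) commas, slice by slice."""
--     segs = []
--     while True:
--         k = _find_comma(s)
--         if k is None:
--             segs.append(s)
--             return segs
--         segs.append(s[:k])
--         s = s[k + 1:]
--
--
-- def fix_row(row_line: str, null_column_indexes: list[int]) -> str:
--     row = row_line.strip()
--     if not row.startswith('('):
--         return row_line
--
--     ends_with_comma = row.endswith(',')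
--     if ends_with_comma:
--         row = row[:-1]
--
--     parts = [seg.strip() for seg in _split_top(row[1:-1])]
--
--     n = len(parts)
--     targets = {i + n if i < 0 else i for i in null_column_indexes}
--     parts = ['NULL' if k in targets and p in ("''", '""') else p
--              for k, p in enumerate(parts)]
--
--     sep = '),' if ends_with_comma else ';'
--     return '(' + ', '.join(parts) + sep + '\n'
-- ===== Notes on version B (the rewrite author's own statement) =====
-- stated objective: alternative
-- what changed: A parses with a single character-accumulator state machine that grows a buffer and a parts list in one pass and then patches parts in place index by index; B repeatedly finds the next top-level comma and slices the field off, then marks NULL columns in one positional comprehension over a precomputed set of normalized target indexes.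
-- outside the precondition, e.g. on fix_row('(a,b)', [-2]): A returns '(a, b;\n', B returns '(a, b;\n'
import Mathlib
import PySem

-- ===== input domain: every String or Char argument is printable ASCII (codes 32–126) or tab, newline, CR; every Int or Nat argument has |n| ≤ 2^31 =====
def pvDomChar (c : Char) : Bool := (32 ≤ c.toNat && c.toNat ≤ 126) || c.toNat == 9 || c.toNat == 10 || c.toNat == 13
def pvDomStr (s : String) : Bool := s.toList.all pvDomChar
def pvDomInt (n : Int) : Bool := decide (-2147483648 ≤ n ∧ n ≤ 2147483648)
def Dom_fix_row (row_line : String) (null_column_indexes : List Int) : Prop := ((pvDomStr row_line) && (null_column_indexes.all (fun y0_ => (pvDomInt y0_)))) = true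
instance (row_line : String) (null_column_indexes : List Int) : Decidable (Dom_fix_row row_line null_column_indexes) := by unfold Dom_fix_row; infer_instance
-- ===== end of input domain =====

-- B re-implements the tuple parser by repeated find-first-top-level-comma + slice and marks NULL
-- columns with one positional pass over a precomputed target set (alternative decomposition, same cost).


-- ===== PORT A =====
-- the quote-state update both Pythons perform on each character (the `char in ['"', "'"]` branch);
-- Python's initial quote_char is '' — it is never compared before being assigned, ported as ' '
def qstep (c : Char) (inq : Bool) (qc : Char) : Bool × Char :=
  if c = '"' ∨ c = '\'' then
    if inq = false then (true, c)
    else if c = qc then (false, qc)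
    else (inq, qc)
  else (inq, qc)

-- A's `for char in row[1:-1]` loop; returns (parts, current) as they stand after the loop
def fixRowLoop : List Char → Bool → Char → List Char → List (List Char) → List (List Char) × List Char
  | [], _, _, cur, parts => (parts, cur)
  | c :: cs, inq, qc, cur, parts =>
    let p := qstep c inq qc
    if c = ',' ∧ p.1 = false then fixRowLoop cs p.1 p.2 [] (parts ++ [PySem.Chars.strip cur])
    else fixRowLoop cs p.1 p.2 (cur ++ [c]) parts

def fix_row (row_line : String) (null_column_indexes : List Int) : String :=
  let row := PySem.Chars.strip row_line.toList
  if PySem.Chars.startswith row ['('] = false then row_line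
  else
    let ewc := PySem.Chars.endswith row [',']
    let row := if ewc then PySem.List.slice row none (some (-1)) else row
    let st := fixRowLoop (PySem.List.slice row (some 1) (some (-1))) false ' ' [] []
    let parts := st.1 ++ [PySem.Chars.strip st.2]
    -- `parts[i]`/`parts[i] = 'NULL'` raise IndexError for i < -len(parts); Pre_ keeps such i out,
    -- so the pyGetD/pySetD defaults are never taken
    let parts := null_column_indexes.foldl (fun ps i =>
      if i < (ps.length : Int) ∧ (PySem.List.pyGetD ps i [] = ['\'', '\''] ∨ PySem.List.pyGetD ps i [] = ['"', '"'])
      then PySem.List.pySetD ps i ['N', 'U', 'L', 'L'] else ps) parts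
    let body := PySem.Chars.join [',', ' '] parts
    if ewc then String.ofList ('(' :: body ++ [')', ',', '\n'])
    else String.ofList ('(' :: body ++ [';', '\n'])

-- ===== PORT B =====
-- Source B's _find_comma: index of the first unquoted comma, or none
def findComma : List Char → Bool → Char → Option Nat
  | [], _, _ => none
  | c :: cs, inq, qc =>
    let p := qstep c inq qc
    if c = ',' ∧ p.1 = false then some 0
    else (findComma cs p.1 p.2).map (· + 1)

theorem findComma_lt {s : List Char} {inq : Bool} {qc : Char} {k : Nat}
    (h : findComma s inq qc = some k) : k < s.length := by
  induction s generalizing inq qc k with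
  | nil => simp [findComma] at h
  | cons c cs ih =>
    simp only [findComma] at h
    split at h
    · injection h with h; subst h; simp
    · simp only [Option.map_eq_some_iff] at h
      obtain ⟨a, ha, rfl⟩ := h
      have := ih ha
      simp; omega

-- Source B's _split_top loop: slice off the field before the first top-level comma, continue on the rest
def splitTop (s : List Char) : List (List Char) :=
  match h : findComma s false ' ' with
  | none => [s]
  | some k =>
    have hk : k < s.length := findComma_lt h
    s.take k :: splitTop (s.drop (k + 1))
termination_by s.length
decreasing_by simp; omega

def fix_row_alt (row_line : String) (null_column_indexes : List Int) : String :=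
  let row := PySem.Chars.strip row_line.toList
  if PySem.Chars.startswith row ['('] = false then row_line
  else
    let ewc := PySem.Chars.endswith row [',']
    let row := if ewc then PySem.List.slice row none (some (-1)) else row
    let parts := (splitTop (PySem.List.slice row (some 1) (some (-1)))).map PySem.Chars.strip
    let n := parts.length
    let targets := PySem.Set.ofList (null_column_indexes.map (fun i => if i < 0 then i + (n : Int) else i))
    let parts := (PySem.List.enumerate parts).map (fun kp =>
      if kp.1 ∈ targets ∧ (kp.2 = ['\'', '\''] ∨ kp.2 = ['"', '"'])
      then ['N', 'U', 'L', 'L'] else kp.2)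
    let body := PySem.Chars.join [',', ' '] parts
    String.ofList ('(' :: body ++ (if ewc then [')', ',', '\n'] else [';', '\n']))

-- ===== PRECONDITION & SPEC =====
-- Pre_ excludes null-column indexes ≤ -2 on lines parsed as tuples (stripped line starts with '('):
-- there A's parts[i] may raise IndexError whenever |i| exceeds the parsed field count, a bound that
-- is not closed-form in the input; index -1 can never raise since there is always at least one field.
def Pre_fix_row (row_line : String) (null_column_indexes : List Int) : Prop :=
  PySem.Chars.startswith (PySem.Chars.strip row_line.toList) ['('] = true →
    ∀ i ∈ null_column_indexes, -1 ≤ i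
instance (row_line : String) (null_column_indexes : List Int) : Decidable (Pre_fix_row row_line null_column_indexes) := by unfold Pre_fix_row; infer_instance

def pvWitness_fix_row : String × List Int := ("('',1),", [0])

def Spec_fix_row (row_line : String) (null_column_indexes : List Int) (out : String) : Prop := out = fix_row_alt row_line null_column_indexes
instance (row_line : String) (null_column_indexes : List Int) (out : String) : Decidable (Spec_fix_row row_line null_column_indexes out) := by unfold Spec_fix_row; infer_instance

-- ===== CLAIM (what is proved, stated in full; the proofs are below) =====
def Claim_equal_fix_row : Prop := ∀ (row_line : String) (null_column_indexes : List Int), Dom_fix_row row_line null_column_indexes → Pre_fix_row row_line null_column_indexes → Spec_fix_row row_line null_column_indexes (fix_row row_line null_column_indexes)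

-- ===== LEMMAS AND PROOFS =====

-- prepend `cur` onto the first piece of a split (the buffer A is still carrying)
def glue (cur : List Char) : List (List Char) → List (List Char)
  | [] => [cur]
  | h :: t => (cur ++ h) :: t

-- one unfolding of B's splitter, from an arbitrary mid-scan quote state
def spAux (s : List Char) (inq : Bool) (qc : Char) : List (List Char) :=
  match findComma s inq qc with
  | none => [s]
  | some k => s.take k :: splitTop (s.drop (k + 1))

theorem findComma_irrel (s : List Char) (q q' : Char) :
    findComma s false q = findComma s false q' := by
  induction s generalizing q q' with
  | nil => rfl
  | cons c cs ih =>
    simp only [findComma, qstep]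
    by_cases hq : c = '"' ∨ c = '\''
    · simp [hq]
    · by_cases hc : c = ','
      · simp [hc]
      · simp [hq, hc, ih q q']

theorem splitTop_none {s : List Char} (h : findComma s false ' ' = none) :
    splitTop s = [s] := by
  conv_lhs => rw [splitTop.eq_def]
  split <;> simp_all

theorem splitTop_some {s : List Char} {k : Nat} (h : findComma s false ' ' = some k) :
    splitTop s = s.take k :: splitTop (s.drop (k + 1)) := by
  conv_lhs => rw [splitTop.eq_def]
  split <;> simp_all

theorem spAux_eq_none {s : List Char} {inq : Bool} {qc : Char}
    (h : findComma s inq qc = none) : spAux s inq qc = [s] := by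
  simp [spAux, h]

theorem spAux_eq_some {s : List Char} {inq : Bool} {qc : Char} {k : Nat}
    (h : findComma s inq qc = some k) :
    spAux s inq qc = s.take k :: splitTop (s.drop (k + 1)) := by
  simp [spAux, h]

theorem spAux_false (s : List Char) (q : Char) : spAux s false q = splitTop s := by
  have hirr := findComma_irrel s q ' '
  cases h : findComma s false ' ' with
  | none => rw [spAux_eq_none (hirr.trans h), splitTop_none h]
  | some k => rw [spAux_eq_some (hirr.trans h), splitTop_some h]

theorem splitTop_ne_nil (s : List Char) : splitTop s ≠ [] := by
  cases h : findComma s false ' ' with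
  | none => rw [splitTop_none h]; simp
  | some k => rw [splitTop_some h]; simp

theorem glue_nil {ls : List (List Char)} (h : ls ≠ []) : glue [] ls = ls := by
  cases ls with
  | nil => simp at h
  | cons a t => simp [glue]

theorem parse_eq (s : List Char) : ∀ (inq : Bool) (qc : Char) (cur : List Char) (parts : List (List Char)),
    (fixRowLoop s inq qc cur parts).1 ++ [PySem.Chars.strip (fixRowLoop s inq qc cur parts).2]
      = parts ++ (glue cur (spAux s inq qc)).map PySem.Chars.strip := by
  induction s with
  | nil =>
    intro inq qc cur parts
    simp [fixRowLoop, spAux, findComma, glue]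
  | cons c cs ih =>
    intro inq qc cur parts
    by_cases hc : c = ',' ∧ (qstep c inq qc).1 = false
    · have hq : qstep c inq qc = (inq, qc) := by
        simp [qstep, hc.1]
      have hinq : inq = false := by rw [hq] at hc; exact hc.2
      subst hinq
      have hfc : findComma (c :: cs) false qc = some 0 := by
        simp only [findComma, if_pos hc]
      simp only [fixRowLoop]
      rw [if_pos hc, hq, ih]
      rw [spAux_false, spAux_eq_some hfc]
      rw [glue_nil (splitTop_ne_nil cs)]
      simp [glue, List.append_assoc]
    · simp only [fixRowLoop]
      rw [if_neg hc, ih]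
      have hfc : findComma (c :: cs) inq qc
          = (findComma cs (qstep c inq qc).1 (qstep c inq qc).2).map (· + 1) := by
        simp only [findComma, if_neg hc]
      cases h : findComma cs (qstep c inq qc).1 (qstep c inq qc).2 with
      | none =>
        rw [spAux_eq_none h, spAux_eq_none (by rw [hfc, h]; rfl)]
        simp [glue, List.append_assoc]
      | some k =>
        rw [spAux_eq_some h, spAux_eq_some (s := c :: cs) (k := k + 1) (by rw [hfc, h]; rfl)]
        simp [glue, List.append_assoc, List.take_succ_cons, List.drop_succ_cons]

theorem parse_top (s : List Char) :
    (fixRowLoop s false ' ' [] []).1 ++ [PySem.Chars.strip (fixRowLoop s false ' ' [] []).2]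
      = (splitTop s).map PySem.Chars.strip := by
  rw [parse_eq, spAux_false, glue_nil (splitTop_ne_nil s)]
  simp

-- result of marking, position by position: position j becomes NULL when j is a target (∈ S)
-- and holds a doubled quote
def gmap (S : List Int) (ps : List (List Char)) : List (List Char) :=
  (PySem.List.enumerate ps).map (fun kp =>
    if kp.1 ∈ S ∧ (kp.2 = ['\'', '\''] ∨ kp.2 = ['"', '"']) then ['N', 'U', 'L', 'L'] else kp.2)

theorem length_gmap (S : List Int) (ps : List (List Char)) :
    (gmap S ps).length = ps.length := by
  simp [gmap, PySem.List.length_enumerate]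

theorem getElem_gmap (S : List Int) (ps : List (List Char)) (j : Nat) (hj : j < ps.length) :
    (gmap S ps)[j]'(by rw [length_gmap]; exact hj)
      = if (j : Int) ∈ S ∧ (ps[j] = ['\'', '\''] ∨ ps[j] = ['"', '"'])
        then ['N', 'U', 'L', 'L'] else ps[j] := by
  simp [gmap, PySem.List.getElem_enumerate]

theorem gmap_nilS (ps : List (List Char)) : gmap [] ps = ps := by
  simp [gmap, PySem.List.map_snd_enumerate]

theorem gmap_ofList (S : List Int) (ps : List (List Char)) :
    gmap (PySem.Set.ofList S) ps = gmap S ps := by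
  simp only [gmap, PySem.Set.mem_ofList]

theorem gmap_append_noop (S : List Int) (ps : List (List Char)) (x : Int)
    (hx : ∀ (j : Nat) (hj : j < ps.length), (j : Int) = x →
      ((j : Int) ∈ S ∨ ¬ (ps[j]'hj = ['\'', '\''] ∨ ps[j]'hj = ['"', '"']))) :
    gmap (S ++ [x]) ps = gmap S ps := by
  apply List.ext_getElem (by rw [length_gmap, length_gmap])
  intro j hj hj'
  rw [length_gmap] at hj
  rw [getElem_gmap S ps j hj, getElem_gmap (S ++ [x]) ps j hj]
  by_cases hjx : (j : Int) = x
  · rcases hx j hj hjx with hS | hT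
    · simp [List.mem_append, hS]
    · simp [hT]
  · simp [List.mem_append, hjx]

theorem gmap_append_set (S : List Int) (ps : List (List Char)) (j : Nat)
    (hjl : j < ps.length) (hC : (j : Int) ∉ S)
    (hT : ps[j] = ['\'', '\''] ∨ ps[j] = ['"', '"']) :
    gmap (S ++ [(j : Int)]) ps = (gmap S ps).set j ['N', 'U', 'L', 'L'] := by
  apply List.ext_getElem (by simp [length_gmap])
  intro k hk hk'
  rw [length_gmap] at hk
  rw [getElem_gmap (S ++ [(j : Int)]) ps k hk, List.getElem_set,
    getElem_gmap S ps k hk]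
  by_cases hkj : k = j
  · subst hkj
    simp [hT, hC]
  · have : ((k : Int) ∈ S ++ [(j : Int)]) ↔ (k : Int) ∈ S := by
      simp only [List.mem_append, List.mem_singleton, Int.natCast_inj]
      constructor
      · rintro (h | h)
        · exact h
        · exact absurd (by exact_mod_cast h) hkj
      · exact Or.inl
    rw [if_neg (show ¬ j = k from fun h => hkj h.symm)]
    simp only [this]

theorem pySetD_neg_one' {α : Type} (xs : List α) (hx : xs ≠ []) (v : α) :
    PySem.List.pySetD xs (-1) v = xs.set (xs.length - 1) v := by
  have hl : 0 < xs.length := List.length_pos_iff.mpr hx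
  simp only [PySem.List.pySetD, PySem.List.pySet?, PySem.List.pyIdx?]
  rw [if_neg (by omega), if_pos (by omega)]
  simp

theorem step_gmap (S : List Int) (ps : List (List Char)) (i : Int) (hi : -1 ≤ i) :
    (if i < ((gmap S ps).length : Int) ∧
        (PySem.List.pyGetD (gmap S ps) i [] = ['\'', '\''] ∨
          PySem.List.pyGetD (gmap S ps) i [] = ['"', '"'])
      then PySem.List.pySetD (gmap S ps) i ['N', 'U', 'L', 'L'] else gmap S ps)
      = gmap (S ++ [if i < 0 then i + (ps.length : Int) else i]) ps := by
  by_cases hps : ps = []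
  · subst hps
    have h0 : gmap S [] = [] := by simp [gmap, PySem.List.enumerate]
    rw [h0]
    have hg : PySem.List.pyGetD ([] : List (List Char)) i [] = [] := by
      simp [PySem.List.pyGetD, PySem.List.pyGet?, PySem.List.pyIdx?]
    rw [hg]
    rw [if_neg (by simp)]
    rw [show gmap (S ++ [if i < 0 then i + (([] : List (List Char)).length : Int) else i]) [] = [] by
      simp [gmap, PySem.List.enumerate]]
  · have hn : 0 < ps.length := List.length_pos_iff.mpr hps
    have hne : gmap S ps ≠ [] := by
      intro h
      have := length_gmap S ps
      rw [h] at this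
      simp at this
      omega
    by_cases hge : (ps.length : Int) ≤ i
    · rw [if_neg (by rw [length_gmap]; rintro ⟨h1, -⟩; omega)]
      rw [if_neg (by omega)]
      refine (gmap_append_noop S ps i ?_).symm
      intro j hj hjx
      exfalso
      omega
    · have hiu : i < (ps.length : Int) := by omega
      rcases (by omega : i = -1 ∨ 0 ≤ i) with hi1 | hi0
      -- case i = -1: the last field
      · subst hi1
        have hj1 : ps.length - 1 < ps.length := by omega
        have hget : PySem.List.pyGetD (gmap S ps) (-1) []
            = (gmap S ps)[ps.length - 1]'(by rw [length_gmap]; exact hj1) := by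
          rw [PySem.List.pyGetD_neg_one _ [] hne, List.getLast_eq_getElem]
          simp only [length_gmap]
        have hset : PySem.List.pySetD (gmap S ps) (-1) ['N', 'U', 'L', 'L']
            = (gmap S ps).set (ps.length - 1) ['N', 'U', 'L', 'L'] := by
          rw [pySetD_neg_one' _ hne, length_gmap]
        have hnorm : (if (-1 : Int) < 0 then (-1) + (ps.length : Int) else (-1))
            = ((ps.length - 1 : Nat) : Int) := by
          rw [if_pos (by omega)]
          omega
        rw [hget, hset, hnorm, getElem_gmap S ps (ps.length - 1) hj1]
        by_cases hC : ((ps.length - 1 : Nat) : Int) ∈ S <;>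
        by_cases hT : ps[ps.length - 1]'hj1 = ['\'', '\''] ∨ ps[ps.length - 1]'hj1 = ['"', '"']
        · rw [if_pos (show (((ps.length - 1 : Nat) : Int) ∈ S ∧ (ps[ps.length - 1]'hj1 = ['\'', '\''] ∨ ps[ps.length - 1]'hj1 = ['"', '"'])) from ⟨hC, hT⟩)]
          rw [if_neg (show ¬ ((-1 : Int) < ((gmap S ps).length : Int) ∧ (['N', 'U', 'L', 'L'] = ['\'', '\''] ∨ ['N', 'U', 'L', 'L'] = ['"', '"'])) from
            by rintro ⟨-, h | h⟩ <;> simp at h)]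
          exact (gmap_append_noop S ps _ (fun j hj hjx => Or.inl (by rw [hjx]; exact hC))).symm
        · rw [if_neg (show ¬ (((ps.length - 1 : Nat) : Int) ∈ S ∧ (ps[ps.length - 1]'hj1 = ['\'', '\''] ∨ ps[ps.length - 1]'hj1 = ['"', '"'])) from fun h => hT h.2)]
          rw [if_neg (show ¬ ((-1 : Int) < ((gmap S ps).length : Int) ∧ (ps[ps.length - 1]'hj1 = ['\'', '\''] ∨ ps[ps.length - 1]'hj1 = ['"', '"'])) from
            fun h => hT h.2)]
          refine (gmap_append_noop S ps _ ?_).symm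
          intro j hj hjx
          right
          have hjJ : j = ps.length - 1 := by omega
          subst hjJ
          exact hT
        · rw [if_neg (show ¬ (((ps.length - 1 : Nat) : Int) ∈ S ∧ (ps[ps.length - 1]'hj1 = ['\'', '\''] ∨ ps[ps.length - 1]'hj1 = ['"', '"'])) from fun h => hC h.1)]
          rw [if_pos (show ((-1 : Int) < ((gmap S ps).length : Int) ∧ (ps[ps.length - 1]'hj1 = ['\'', '\''] ∨ ps[ps.length - 1]'hj1 = ['"', '"'])) from
            ⟨by rw [length_gmap]; omega, hT⟩)]
          exact (gmap_append_set S ps _ hj1 hC hT).symm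
        · rw [if_neg (show ¬ (((ps.length - 1 : Nat) : Int) ∈ S ∧ (ps[ps.length - 1]'hj1 = ['\'', '\''] ∨ ps[ps.length - 1]'hj1 = ['"', '"'])) from fun h => hC h.1)]
          rw [if_neg (show ¬ ((-1 : Int) < ((gmap S ps).length : Int) ∧ (ps[ps.length - 1]'hj1 = ['\'', '\''] ∨ ps[ps.length - 1]'hj1 = ['"', '"'])) from
            fun h => hT h.2)]
          refine (gmap_append_noop S ps _ ?_).symm
          intro j hj hjx
          right
          have hjJ : j = ps.length - 1 := by omega
          subst hjJ
          exact hT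
      -- case 0 ≤ i < len
      · have hj1 : i.toNat < ps.length := by omega
        have hget : PySem.List.pyGetD (gmap S ps) i []
            = (gmap S ps)[i.toNat]'(by rw [length_gmap]; exact hj1) :=
          PySem.List.pyGetD_eq_getElem _ [] hi0 (by rw [length_gmap]; exact hiu)
        have hset : PySem.List.pySetD (gmap S ps) i ['N', 'U', 'L', 'L']
            = (gmap S ps).set i.toNat ['N', 'U', 'L', 'L'] :=
          PySem.List.pySetD_of_nonneg _ _ hi0
        have hnorm : (if i < 0 then i + (ps.length : Int) else i) = ((i.toNat : Nat) : Int) := by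
          rw [if_neg (by omega)]
          omega
        rw [hget, hset, hnorm, getElem_gmap S ps i.toNat hj1]
        by_cases hC : ((i.toNat : Nat) : Int) ∈ S <;>
        by_cases hT : ps[i.toNat]'hj1 = ['\'', '\''] ∨ ps[i.toNat]'hj1 = ['"', '"']
        · rw [if_pos (show (((i.toNat : Nat) : Int) ∈ S ∧ (ps[i.toNat]'hj1 = ['\'', '\''] ∨ ps[i.toNat]'hj1 = ['"', '"'])) from ⟨hC, hT⟩)]
          rw [if_neg (show ¬ (i < ((gmap S ps).length : Int) ∧ (['N', 'U', 'L', 'L'] = ['\'', '\''] ∨ ['N', 'U', 'L', 'L'] = ['"', '"'])) from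
            by rintro ⟨-, h | h⟩ <;> simp at h)]
          exact (gmap_append_noop S ps _ (fun j hj hjx => Or.inl (by rw [hjx]; exact hC))).symm
        · rw [if_neg (show ¬ (((i.toNat : Nat) : Int) ∈ S ∧ (ps[i.toNat]'hj1 = ['\'', '\''] ∨ ps[i.toNat]'hj1 = ['"', '"'])) from fun h => hT h.2)]
          rw [if_neg (show ¬ (i < ((gmap S ps).length : Int) ∧ (ps[i.toNat]'hj1 = ['\'', '\''] ∨ ps[i.toNat]'hj1 = ['"', '"'])) from
            fun h => hT h.2)]
          refine (gmap_append_noop S ps _ ?_).symm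
          intro j hj hjx
          right
          have hjJ : j = i.toNat := by omega
          subst hjJ
          exact hT
        · rw [if_neg (show ¬ (((i.toNat : Nat) : Int) ∈ S ∧ (ps[i.toNat]'hj1 = ['\'', '\''] ∨ ps[i.toNat]'hj1 = ['"', '"'])) from fun h => hC h.1)]
          rw [if_pos (show (i < ((gmap S ps).length : Int) ∧ (ps[i.toNat]'hj1 = ['\'', '\''] ∨ ps[i.toNat]'hj1 = ['"', '"'])) from
            ⟨by rw [length_gmap]; exact hiu, hT⟩)]
          exact (gmap_append_set S ps _ hj1 hC hT).symm
        · rw [if_neg (show ¬ (((i.toNat : Nat) : Int) ∈ S ∧ (ps[i.toNat]'hj1 = ['\'', '\''] ∨ ps[i.toNat]'hj1 = ['"', '"'])) from fun h => hC h.1)]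
          rw [if_neg (show ¬ (i < ((gmap S ps).length : Int) ∧ (ps[i.toNat]'hj1 = ['\'', '\''] ∨ ps[i.toNat]'hj1 = ['"', '"'])) from
            fun h => hT h.2)]
          refine (gmap_append_noop S ps _ ?_).symm
          intro j hj hjx
          right
          have hjJ : j = i.toNat := by omega
          subst hjJ
          exact hT

theorem fold_gmap (idxs : List Int) : ∀ (S : List Int) (ps : List (List Char)),
    (∀ i ∈ idxs, -1 ≤ i) →
    idxs.foldl (fun ps' i =>
      if i < (ps'.length : Int) ∧
          (PySem.List.pyGetD ps' i [] = ['\'', '\''] ∨ PySem.List.pyGetD ps' i [] = ['"', '"'])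
      then PySem.List.pySetD ps' i ['N', 'U', 'L', 'L'] else ps') (gmap S ps)
      = gmap (S ++ idxs.map (fun i => if i < 0 then i + (ps.length : Int) else i)) ps := by
  induction idxs with
  | nil => intro S ps _; simp
  | cons i rest ih =>
    intro S ps h
    simp only [List.foldl_cons]
    rw [step_gmap S ps i (h i (by simp))]
    rw [ih _ ps (fun x hx => h x (by simp [hx]))]
    simp [List.append_assoc]

theorem core_eq (inner : List Char) (idxs : List Int) (h : ∀ i ∈ idxs, -1 ≤ i) :
    idxs.foldl (fun ps i =>
      if i < (ps.length : Int) ∧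
          (PySem.List.pyGetD ps i [] = ['\'', '\''] ∨ PySem.List.pyGetD ps i [] = ['"', '"'])
      then PySem.List.pySetD ps i ['N', 'U', 'L', 'L'] else ps)
      ((fixRowLoop inner false ' ' [] []).1 ++ [PySem.Chars.strip (fixRowLoop inner false ' ' [] []).2])
      = (PySem.List.enumerate ((splitTop inner).map PySem.Chars.strip)).map (fun kp =>
          if kp.1 ∈ PySem.Set.ofList (idxs.map (fun i =>
              if i < 0 then i + ((((splitTop inner).map PySem.Chars.strip).length : Int)) else i)) ∧
              (kp.2 = ['\'', '\''] ∨ kp.2 = ['"', '"'])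
          then ['N', 'U', 'L', 'L'] else kp.2) := by
  rw [parse_top]
  conv_lhs => rw [← gmap_nilS ((splitTop inner).map PySem.Chars.strip)]
  rw [fold_gmap idxs [] _ h]
  rw [List.nil_append, ← gmap_ofList]
  simp only [gmap]

-- ===== VERDICT (by name: the statement is the Claim_ definition above) =====
theorem fix_row_spec : Claim_equal_fix_row := by
  unfold Claim_equal_fix_row
  intro row_line idxs hdom hpre
  unfold Spec_fix_row
  simp only [fix_row, fix_row_alt]
  by_cases hs : PySem.Chars.startswith (PySem.Chars.strip row_line.toList) ['('] = false
  · rw [if_pos hs, if_pos hs]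
  · rw [if_neg hs, if_neg hs]
    have hpre' : ∀ i ∈ idxs, -1 ≤ i := hpre (by simpa using hs)
    cases hew : PySem.Chars.endswith (PySem.Chars.strip row_line.toList) [','] with
    | false =>
      simp only [Bool.false_eq_true, ite_false]
      rw [core_eq _ idxs hpre']
    | true =>
      simp only [ite_true]
      rw [core_eq _ idxs hpre']
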